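-- pv_equiv track=rewrite | github.com/adkinss/adventofcode | 2023/day_11.py | mark_empty_rows_and_columns
-- ===== SOURCE A (Python) =====
-- import copy
--
-- def mark_empty_rows_and_columns(original_data):
--     """
--     For every row or column of all dots, convert the row or column to all commas
--     instead. This will make it easier to identify empty rows and columns in the
--     future without scanning the entire row or column.  Return the new data with
--     the marked empty rows and columns.
--     """
--     # Copy the data first and return the copy.
--     data = copy.deepcopy(original_data)
--
--     # First, scan the columns. Go backwards, as that allows us to add new
--     # columns on the fly without confusing the loop because of added data.
--     max_rows, max_cols = [len(data), len(data[0])]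
--     for c in range(max_cols - 1, -1, -1):
--         all_dots = True
--         for r in range(max_rows):
--             if data[r][c] != ".":
--                 all_dots = False
--         if all_dots:
--             for r in range(max_rows):
--                 data[r][c] = ","
--
--     # Now, do the rows in a similar manner as the columns. If we added any
--     # columns from above, the max_cols will need to be updated.
--     max_cols = len(data[0])
--     for r in range(max_rows - 1, -1, -1):
--         all_dots = True
--         for c in range(max_cols):
--             if data[r][c] != "." and data[r][c] != ",":
--                 all_dots = False
--         if all_dots:
--             for c in range(max_cols):
--                 data[r][c] = ","
--
--     return data
-- ===== SOURCE B (Python) =====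
-- import copy
--
-- def mark_empty_rows_and_columns(original_data):
--     """
--     For every row or column of all dots, convert the row or column to all commas
--     instead.  Build the two index sets from the original grid first, then apply
--     them to a copy in a single pass.
--     """
--     nrows = len(original_data)
--     ncols = len(original_data[0])
--     empty_rows = {r for r in range(nrows)
--                   if all(original_data[r][c] == "." for c in range(ncols))}
--     empty_cols = {c for c in range(ncols)
--                   if all(original_data[r][c] == "." for r in range(nrows))}
--     data = copy.deepcopy(original_data)
--     for r in range(nrows):
--         for c in range(ncols):
--             if r in empty_rows or c in empty_cols:
--                 data[r][c] = ","
--     return data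
-- ===== Notes on version B (the rewrite author's own statement) =====
-- stated objective: simpler
-- what changed: A interleaves detection and mutation in two backwards scan-and-mark passes (columns on the copy, then rows judged on the already-marked copy); B first computes the empty-row and empty-column index sets from the original grid in two read-only passes and then marks a copy in one apply pass.
-- outside the precondition, e.g. on mark_empty_rows_and_columns([['.', ','], ['', '']]): A returns [[',', ','], ['', '']], B returns [['.', ','], ['', '']]
import Mathlib
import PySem

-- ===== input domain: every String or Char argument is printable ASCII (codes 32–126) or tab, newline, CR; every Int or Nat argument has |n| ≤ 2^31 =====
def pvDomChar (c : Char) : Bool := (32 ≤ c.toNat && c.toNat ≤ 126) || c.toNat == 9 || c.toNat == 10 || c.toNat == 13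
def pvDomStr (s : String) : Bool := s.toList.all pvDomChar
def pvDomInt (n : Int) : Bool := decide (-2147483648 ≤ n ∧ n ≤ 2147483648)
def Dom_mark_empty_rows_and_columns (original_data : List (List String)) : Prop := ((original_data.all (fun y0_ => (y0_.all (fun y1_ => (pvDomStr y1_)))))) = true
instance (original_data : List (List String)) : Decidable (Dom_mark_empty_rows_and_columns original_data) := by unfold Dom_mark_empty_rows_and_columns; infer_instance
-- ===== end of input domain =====

-- B replaces A's interleaved backwards column-then-row scan-and-mutate passes by two
-- read-only index-set passes over the original grid plus one apply pass (objective: simpler).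
-- Neither program mutates its argument (A deepcopies first); the claim is about the return value.

set_option maxHeartbeats 1000000


-- ===== PORT A =====
-- data[r][c]: Python raises IndexError when out of range; every access is in range under Pre_,
-- so the getD defaults below are never read on admitted inputs.
def pvCell (d : List (List String)) (r c : Nat) : String := (d.getD r []).getD c ""
-- data[r][c] = v  (functional rendering of the in-place update)
def pvSetCell (d : List (List String)) (r c : Nat) (v : String) : List (List String) :=
  d.modify r (fun row => row.set c v)

-- the inner 'all_dots' scan of A's column loop
def pvAllDotsCol (data : List (List String)) (max_rows c : Nat) : Bool :=
  (List.range max_rows).foldl (fun all_dots r => if pvCell data r c ≠ "." then false else all_dots) true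
-- 'for r in range(max_rows): data[r][c] = ","'
def pvMarkCol (data : List (List String)) (max_rows c : Nat) : List (List String) :=
  (List.range max_rows).foldl (fun d r => pvSetCell d r c ",") data
def pvColStep (max_rows : Nat) (data : List (List String)) (c : Nat) : List (List String) :=
  if pvAllDotsCol data max_rows c then pvMarkCol data max_rows c else data
-- the inner 'all_dots' scan of A's row loop (accepts '.' and ',')
def pvAllDotsRow (data : List (List String)) (max_cols r : Nat) : Bool :=
  (List.range max_cols).foldl
    (fun all_dots c => if pvCell data r c ≠ "." ∧ pvCell data r c ≠ "," then false else all_dots) true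
-- 'for c in range(max_cols): data[r][c] = ","'
def pvMarkRow (data : List (List String)) (max_cols r : Nat) : List (List String) :=
  (List.range max_cols).foldl (fun d c => pvSetCell d r c ",") data
def pvRowStep (max_cols : Nat) (data : List (List String)) (r : Nat) : List (List String) :=
  if pvAllDotsRow data max_cols r then pvMarkRow data max_cols r else data

def mark_empty_rows_and_columns (original_data : List (List String)) : List (List String) :=
  let data := original_data                         -- data = copy.deepcopy(original_data)
  let max_rows := data.length
  let max_cols := (data.getD 0 []).length           -- len(data[0]); IndexError on [] is excluded by Pre_
  -- for c in range(max_cols - 1, -1, -1): scan column c, mark it if all dots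
  let data := ((List.range max_cols).reverse).foldl (fun data c => pvColStep max_rows data c) data
  let max_cols2 := (data.getD 0 []).length          -- max_cols = len(data[0])  (re-read)
  -- for r in range(max_rows - 1, -1, -1): scan row r, mark it if all dots/commas
  ((List.range max_rows).reverse).foldl (fun data r => pvRowStep max_cols2 data r) data

-- ===== PORT B =====
-- all(original_data[r][c] == "." for c in range(ncols))
def pvRowAllDots (od : List (List String)) (ncols r : Nat) : Bool :=
  (List.range ncols).all (fun c => pvCell od r c == ".")
-- all(original_data[r][c] == "." for r in range(nrows))
def pvColAllDots (od : List (List String)) (nrows c : Nat) : Bool :=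
  (List.range nrows).all (fun r => pvCell od r c == ".")

def mark_empty_rows_and_columns_alt (original_data : List (List String)) : List (List String) :=
  let nrows := original_data.length
  let ncols := (original_data.getD 0 []).length     -- len(original_data[0]); [] excluded by Pre_
  let empty_rows : PySem.Set Nat :=
    PySem.Set.ofList ((List.range nrows).filter (fun r => pvRowAllDots original_data ncols r))
  let empty_cols : PySem.Set Nat :=
    PySem.Set.ofList ((List.range ncols).filter (fun c => pvColAllDots original_data nrows c))
  -- data = copy.deepcopy(original_data); one apply pass
  (List.range nrows).foldl (fun data r =>
    (List.range ncols).foldl (fun data c =>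
      if empty_rows.contains r || empty_cols.contains c then pvSetCell data r c "," else data) data)
    original_data

-- ===== PRECONDITION & SPEC =====
-- Pre_ excludes (a) the empty grid and grids with a row shorter than row 0, on which A raises
-- IndexError, and (b) grids where some row's first len(row 0) cells are all '.' or ',' with at
-- least one pre-existing ',' — there an input ',' is indistinguishable from A's own marker, so
-- A's row scan (built to accept its own column marks) counts the row empty while B (judging
-- dots on the original grid) does not: an unspecified corner with two defensible readings.
def Pre_mark_empty_rows_and_columns (original_data : List (List String)) : Prop :=
  original_data ≠ [] ∧
  (∀ row ∈ original_data, (original_data.getD 0 []).length ≤ row.length) ∧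
  (∀ row ∈ original_data,
    (∀ c < (original_data.getD 0 []).length, (row.getD c "" = "." ∨ row.getD c "" = ",")) →
    ∀ c < (original_data.getD 0 []).length, row.getD c "" ≠ ",")
instance (original_data : List (List String)) : Decidable (Pre_mark_empty_rows_and_columns original_data) := by
  unfold Pre_mark_empty_rows_and_columns; infer_instance

def pvWitness_mark_empty_rows_and_columns : List (List String) :=
  [[".", "#"], [".", "."]]

def Spec_mark_empty_rows_and_columns (original_data : List (List String)) (out : List (List String)) : Prop := out = mark_empty_rows_and_columns_alt original_data
instance (original_data : List (List String)) (out : List (List String)) : Decidable (Spec_mark_empty_rows_and_columns original_data out) := by unfold Spec_mark_empty_rows_and_columns; infer_instance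

-- ===== CLAIM (what is proved, stated in full; the proofs are below) =====
def Claim_equal_mark_empty_rows_and_columns : Prop := ∀ (original_data : List (List String)), Dom_mark_empty_rows_and_columns original_data → Pre_mark_empty_rows_and_columns original_data → Spec_mark_empty_rows_and_columns original_data (mark_empty_rows_and_columns original_data)

-- ===== LEMMAS AND PROOFS =====

-- proof-only abbreviations (abbrev so Decidable instances see through them)
abbrev pvColE (od : List (List String)) (c : Nat) : Prop := ∀ r < od.length, pvCell od r c = "."
abbrev pvShape (od d : List (List String)) : Prop :=
  d.length = od.length ∧ ∀ i, (d.getD i []).length = (od.getD i []).length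

lemma pvSetCell_length (d : List (List String)) (r c : Nat) (v : String) :
    (pvSetCell d r c v).length = d.length := by
  simp [pvSetCell]

lemma pvSetCell_rowlen (d : List (List String)) (r c : Nat) (v : String) (i : Nat) :
    ((pvSetCell d r c v).getD i []).length = (d.getD i []).length := by
  unfold pvSetCell
  by_cases h : i < d.length
  · have h' : i < (d.modify r fun row => row.set c v).length := by
      rw [List.length_modify]; exact h
    rw [List.getD_eq_getElem _ _ h', List.getD_eq_getElem _ _ h, List.getElem_modify]
    split <;> simp
  · have h0 : d.length ≤ i := Nat.le_of_not_lt h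
    have h' : (d.modify r fun row => row.set c v).length ≤ i := by
      rw [List.length_modify]; exact h0
    rw [List.getD_eq_default _ _ h', List.getD_eq_default _ _ h0]

lemma pvCell_eq_getElem? (d : List (List String)) (i j : Nat) :
    pvCell d i j = (d[i]?.getD [])[j]?.getD "" := by
  simp [pvCell, List.getD_eq_getElem?_getD]

lemma pvCell_setCell (d : List (List String)) (r c : Nat) (v : String) (i j : Nat) :
    pvCell (pvSetCell d r c v) i j =
      if i = r ∧ j = c ∧ r < d.length ∧ c < (d.getD r []).length then v
      else pvCell d i j := by
  rw [pvCell_eq_getElem?, pvCell_eq_getElem?]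
  unfold pvSetCell
  rw [List.getElem?_modify]
  by_cases h : i < d.length
  · rw [List.getElem?_eq_getElem h]
    simp only [Option.map_eq_map, Option.map_some, Option.getD_some]
    by_cases hir : r = i
    · subst hir
      have hrow : d.getD r [] = d[r] := List.getD_eq_getElem _ _ h
      rw [if_pos rfl, List.getElem?_set]
      by_cases hjc : c = j
      · subst hjc
        by_cases hcl : c < d[r].length
        · rw [if_pos rfl, if_pos hcl, Option.getD_some,
            if_pos ⟨rfl, rfl, h, by rw [hrow]; exact hcl⟩]
        · rw [if_pos rfl, if_neg hcl,
            if_neg (by rw [hrow]; rintro ⟨-, -, -, hx⟩; exact hcl hx),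
            List.getElem?_eq_none (Nat.le_of_not_lt hcl)]
      · rw [if_neg hjc, if_neg (by rintro ⟨-, hx, -, -⟩; exact hjc hx.symm)]
    · rw [if_neg hir, if_neg (by rintro ⟨hx, -, -, -⟩; exact hir hx.symm)]
  · rw [List.getElem?_eq_none (Nat.le_of_not_lt h)]
    simp only [Option.map_eq_map, Option.map_none]
    rw [if_neg (by rintro ⟨rfl, -, hr, -⟩; omega)]

lemma pvShape_setCell (od d : List (List String)) (r c : Nat) (v : String)
    (h : pvShape od d) : pvShape od (pvSetCell d r c v) := by
  obtain ⟨h1, h2⟩ := h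
  exact ⟨by rw [pvSetCell_length, h1], fun i => by rw [pvSetCell_rowlen, h2]⟩

-- the flag fold of A's all_dots column scan
lemma pvAllDotsCol_eq (data : List (List String)) (c : Nat) (l : List Nat) (b : Bool) :
    l.foldl (fun all_dots r => if pvCell data r c ≠ "." then false else all_dots) b
      = (b && l.all (fun r => pvCell data r c == ".")) := by
  induction l generalizing b with
  | nil => simp
  | cons x xs ih =>
    rw [List.foldl_cons]
    by_cases h : pvCell data x c = "."
    · rw [if_neg (fun hh => hh h), ih]
      simp [h]
    · rw [if_pos h, ih]
      simp [h]

lemma pvAllDotsCol_iff (data : List (List String)) (n c : Nat) :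
    pvAllDotsCol data n c = true ↔ ∀ r < n, pvCell data r c = "." := by
  unfold pvAllDotsCol
  rw [pvAllDotsCol_eq]
  simp [List.all_eq_true]

-- the flag fold of A's all_dots row scan
lemma pvAllDotsRow_eq (data : List (List String)) (r : Nat) (l : List Nat) (b : Bool) :
    l.foldl (fun all_dots c => if pvCell data r c ≠ "." ∧ pvCell data r c ≠ "," then false else all_dots) b
      = (b && l.all (fun c => (pvCell data r c == ".") || (pvCell data r c == ","))) := by
  induction l generalizing b with
  | nil => simp
  | cons x xs ih =>
    rw [List.foldl_cons]
    by_cases h1 : pvCell data r x = "."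
    · rw [if_neg (fun hh => hh.1 h1), ih]
      simp [h1]
    · by_cases h2 : pvCell data r x = ","
      · rw [if_neg (fun hh => hh.2 h2), ih]
        simp [h2]
      · rw [if_pos ⟨h1, h2⟩, ih]
        simp [h1, h2]

lemma pvAllDotsRow_iff (data : List (List String)) (m r : Nat) :
    pvAllDotsRow data m r = true ↔ ∀ c < m, (pvCell data r c = "." ∨ pvCell data r c = ",") := by
  unfold pvAllDotsRow
  rw [pvAllDotsRow_eq]
  simp [List.all_eq_true]

-- cells after 'mark whole column c over rows in l'
lemma pvMarkColFold_cell (c : Nat) (l : List Nat) (d : List (List String)) (i j : Nat) :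
    pvCell (l.foldl (fun d r => pvSetCell d r c ",") d) i j
      = if i ∈ l ∧ j = c ∧ i < d.length ∧ c < (d.getD i []).length then "," else pvCell d i j := by
  induction l generalizing d with
  | nil => simp
  | cons x xs ih =>
    rw [List.foldl_cons, ih, pvSetCell_length, pvSetCell_rowlen, pvCell_setCell]
    by_cases hx : i ∈ xs <;> by_cases hix : i = x <;> by_cases hjc : j = c <;>
      by_cases hlen : i < d.length ∧ c < (d.getD i []).length <;>
      simp_all [List.mem_cons]

lemma pvMarkColFold_shape (od : List (List String)) (c : Nat) (l : List Nat)
    (d : List (List String)) (h : pvShape od d) :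
    pvShape od (l.foldl (fun d r => pvSetCell d r c ",") d) := by
  induction l generalizing d with
  | nil => exact h
  | cons x xs ih => exact ih _ (pvShape_setCell _ _ _ _ _ h)

-- cells after 'mark whole row r over columns in l'
lemma pvMarkRowFold_cell (r : Nat) (l : List Nat) (d : List (List String)) (i j : Nat) :
    pvCell (l.foldl (fun d c => pvSetCell d r c ",") d) i j
      = if i = r ∧ j ∈ l ∧ r < d.length ∧ j < (d.getD r []).length then "," else pvCell d i j := by
  induction l generalizing d with
  | nil => simp
  | cons x xs ih =>
    rw [List.foldl_cons, ih, pvSetCell_length, pvSetCell_rowlen, pvCell_setCell]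
    by_cases hx : j ∈ xs <;> by_cases hir : i = r <;> by_cases hjx : j = x <;>
      by_cases hlen : r < d.length ∧ j < (d.getD r []).length <;>
      simp_all [List.mem_cons]

lemma pvMarkRowFold_shape (od : List (List String)) (r : Nat) (l : List Nat)
    (d : List (List String)) (h : pvShape od d) :
    pvShape od (l.foldl (fun d c => pvSetCell d r c ",") d) := by
  induction l generalizing d with
  | nil => exact h
  | cons x xs ih => exact ih _ (pvShape_setCell _ _ _ _ _ h)

-- cells after B's conditional inner pass over row r
lemma pvCondRowFold_cell (r : Nat) (q : Nat → Bool) (l : List Nat) (d : List (List String)) (i j : Nat) :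
    pvCell (l.foldl (fun d c => if q c then pvSetCell d r c "," else d) d) i j
      = if i = r ∧ j ∈ l ∧ q j = true ∧ r < d.length ∧ j < (d.getD r []).length then ","
        else pvCell d i j := by
  induction l generalizing d with
  | nil => simp
  | cons x xs ih =>
    rw [List.foldl_cons]
    by_cases hq : q x
    · rw [if_pos hq, ih, pvSetCell_length, pvSetCell_rowlen, pvCell_setCell]
      by_cases hx : j ∈ xs <;> by_cases hir : i = r <;> by_cases hjx : j = x <;>
        by_cases hqj : q j = true <;>
        by_cases hlen : r < d.length ∧ j < (d.getD r []).length <;>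
        simp_all [List.mem_cons]
    · rw [if_neg hq, ih]
      by_cases hx : j ∈ xs <;> by_cases hir : i = r <;> by_cases hjx : j = x <;>
        by_cases hqj : q j = true <;>
        simp_all [List.mem_cons]

lemma pvCondRowFold_shape (od : List (List String)) (r : Nat) (q : Nat → Bool) (l : List Nat)
    (d : List (List String)) (h : pvShape od d) :
    pvShape od (l.foldl (fun d c => if q c then pvSetCell d r c "," else d) d) := by
  induction l generalizing d with
  | nil => exact h
  | cons x xs ih =>
    by_cases hq : q x
    · rw [List.foldl_cons, if_pos hq]; exact ih _ (pvShape_setCell _ _ _ _ _ h)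
    · rw [List.foldl_cons, if_neg hq]; exact ih _ h

-- A's column pass, over any duplicate-free list of in-range columns
lemma pvColPass (od : List (List String))
    (hb : ∀ i < od.length, (od.getD 0 []).length ≤ (od.getD i []).length) :
    ∀ l : List Nat, l.Nodup → (∀ c ∈ l, c < (od.getD 0 []).length) →
    ∀ d : List (List String), pvShape od d →
      (∀ r j, j ∈ l → pvCell d r j = pvCell od r j) →
      pvShape od (l.foldl (fun data c => pvColStep od.length data c) d) ∧
      ∀ i j, pvCell (l.foldl (fun data c => pvColStep od.length data c) d) i j
        = if i < od.length ∧ j ∈ l ∧ pvColE od j then "," else pvCell d i j := by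
  intro l
  induction l with
  | nil => intro _ _ d hsh _; exact ⟨hsh, by simp⟩
  | cons x xs ih =>
    intro hnd hrange d hsh horig
    have hx : x < (od.getD 0 []).length := hrange x (by simp)
    have hnd' : xs.Nodup := (List.nodup_cons.mp hnd).2
    have hxnot : x ∉ xs := (List.nodup_cons.mp hnd).1
    have hall : pvAllDotsCol d od.length x = true ↔ pvColE od x := by
      rw [pvAllDotsCol_iff]
      constructor
      · intro h r hr; rw [← horig r x (by simp)]; exact h r hr
      · intro h r hr; rw [horig r x (by simp)]; exact h r hr
    set d' := pvColStep od.length d x with hd'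
    have hsh' : pvShape od d' := by
      rw [hd']; unfold pvColStep
      split
      · unfold pvMarkCol; exact pvMarkColFold_shape _ _ _ _ hsh
      · exact hsh
    have hcell' : ∀ i j, pvCell d' i j
        = if i < od.length ∧ j = x ∧ pvColE od x then "," else pvCell d i j := by
      intro i j
      rw [hd']; unfold pvColStep
      by_cases hc : pvColE od x
      · rw [if_pos (hall.mpr hc)]
        unfold pvMarkCol
        rw [pvMarkColFold_cell]
        by_cases hi : i < od.length
        · by_cases hj : j = x
          · have h1 : i < d.length := by rw [hsh.1]; exact hi
            have h2 : x < (d.getD i []).length := by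
              rw [hsh.2 i]; exact lt_of_lt_of_le hx (hb i hi)
            subst hj
            rw [if_pos ⟨List.mem_range.mpr hi, rfl, h1, h2⟩, if_pos ⟨hi, rfl, hc⟩]
          · rw [if_neg (fun h => hj h.2.1), if_neg (fun h => hj h.2.1)]
        · have h1 : ¬ i < d.length := by rw [hsh.1]; exact hi
          rw [if_neg (fun h => h1 h.2.2.1), if_neg (fun h => hi h.1)]
      · have hna : ¬ pvAllDotsCol d od.length x = true := fun h => hc (hall.mp h)
        rw [if_neg hna, if_neg (fun h => hc h.2.2)]
    have horig' : ∀ r j, j ∈ xs → pvCell d' r j = pvCell od r j := by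
      intro r j hj
      rw [hcell' r j]
      have hjx : ¬ j = x := fun h => hxnot (h ▸ hj)
      rw [if_neg (fun h => hjx h.2.1)]
      exact horig r j (by simp [hj])
    obtain ⟨hshf, hcellf⟩ := ih hnd' (fun c hc => hrange c (by simp [hc])) d' hsh' horig'
    refine ⟨?_, ?_⟩
    · rw [List.foldl_cons, ← hd']; exact hshf
    · intro i j
      rw [List.foldl_cons, ← hd', hcellf i j, hcell' i j]
      simp only [List.mem_cons]
      by_cases hjx : j = x
      · subst hjx
        split_ifs <;> first | rfl | tauto
      · split_ifs <;> first | rfl | tauto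

-- A's row pass, judged against a frozen grid g that unprocessed rows still agree with
lemma pvRowPass (od g : List (List String))
    (hb : ∀ i < od.length, (od.getD 0 []).length ≤ (od.getD i []).length) :
    ∀ l : List Nat, l.Nodup → (∀ r ∈ l, r < od.length) →
    ∀ d : List (List String), pvShape od d →
      (∀ r c, r ∈ l → pvCell d r c = pvCell g r c) →
      pvShape od (l.foldl (fun data r => pvRowStep (od.getD 0 []).length data r) d) ∧
      ∀ i j, pvCell (l.foldl (fun data r => pvRowStep (od.getD 0 []).length data r) d) i j
        = if i ∈ l ∧ j < (od.getD 0 []).length ∧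
              (∀ c < (od.getD 0 []).length, (pvCell g i c = "." ∨ pvCell g i c = ","))
          then "," else pvCell d i j := by
  intro l
  induction l with
  | nil => intro _ _ d hsh _; exact ⟨hsh, by simp⟩
  | cons x xs ih =>
    intro hnd hrange d hsh horig
    have hx : x < od.length := hrange x (by simp)
    have hnd' : xs.Nodup := (List.nodup_cons.mp hnd).2
    have hxnot : x ∉ xs := (List.nodup_cons.mp hnd).1
    have hall : pvAllDotsRow d (od.getD 0 []).length x = true ↔
        (∀ c < (od.getD 0 []).length, (pvCell g x c = "." ∨ pvCell g x c = ",")) := by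
      rw [pvAllDotsRow_iff]
      constructor
      · intro h c hc; rw [← horig x c (by simp)]; exact h c hc
      · intro h c hc; rw [horig x c (by simp)]; exact h c hc
    set d' := pvRowStep (od.getD 0 []).length d x with hd'
    have hsh' : pvShape od d' := by
      rw [hd']; unfold pvRowStep
      split
      · unfold pvMarkRow; exact pvMarkRowFold_shape _ _ _ _ hsh
      · exact hsh
    have hcell' : ∀ i j, pvCell d' i j
        = if i = x ∧ j < (od.getD 0 []).length ∧
              (∀ c < (od.getD 0 []).length, (pvCell g x c = "." ∨ pvCell g x c = ","))
          then "," else pvCell d i j := by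
      intro i j
      rw [hd']; unfold pvRowStep
      by_cases hc : ∀ c < (od.getD 0 []).length, (pvCell g x c = "." ∨ pvCell g x c = ",")
      · rw [if_pos (hall.mpr hc)]
        unfold pvMarkRow
        rw [pvMarkRowFold_cell]
        by_cases hi : i = x
        · subst hi
          by_cases hj : j < (od.getD 0 []).length
          · have h1 : i < d.length := by rw [hsh.1]; exact hx
            have h2 : j < (d.getD i []).length := by
              rw [hsh.2 i]; exact lt_of_lt_of_le hj (hb i hx)
            rw [if_pos ⟨rfl, List.mem_range.mpr hj, h1, h2⟩, if_pos ⟨rfl, hj, hc⟩]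
          · rw [if_neg (fun h => hj (List.mem_range.mp h.2.1)), if_neg (fun h => hj h.2.1)]
        · rw [if_neg (fun h => hi h.1), if_neg (fun h => hi h.1)]
      · have hna : ¬ pvAllDotsRow d (od.getD 0 []).length x = true := fun h => hc (hall.mp h)
        rw [if_neg hna, if_neg (fun h => hc h.2.2)]
    have horig' : ∀ r c, r ∈ xs → pvCell d' r c = pvCell g r c := by
      intro r c hr
      rw [hcell' r c]
      have hrx : ¬ r = x := fun h => hxnot (h ▸ hr)
      rw [if_neg (fun h => hrx h.1)]
      exact horig r c (by simp [hr])
    obtain ⟨hshf, hcellf⟩ := ih hnd' (fun r hr => hrange r (by simp [hr])) d' hsh' horig'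
    refine ⟨?_, ?_⟩
    · rw [List.foldl_cons, ← hd']; exact hshf
    · intro i j
      rw [List.foldl_cons, ← hd', hcellf i j, hcell' i j]
      simp only [List.mem_cons]
      by_cases hix : i = x
      · subst hix
        split_ifs <;> first | rfl | tauto
      · split_ifs <;> first | rfl | tauto

-- B's apply pass: the marking predicate q is independent of the data being written
lemma pvBPass (od : List (List String))
    (hb : ∀ i < od.length, (od.getD 0 []).length ≤ (od.getD i []).length)
    (q : Nat → Nat → Bool) :
    ∀ l : List Nat, (∀ r ∈ l, r < od.length) →
    ∀ d : List (List String), pvShape od d →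
      pvShape od (l.foldl (fun data r =>
          (List.range (od.getD 0 []).length).foldl
            (fun data c => if q r c then pvSetCell data r c "," else data) data) d) ∧
      ∀ i j, pvCell (l.foldl (fun data r =>
          (List.range (od.getD 0 []).length).foldl
            (fun data c => if q r c then pvSetCell data r c "," else data) data) d) i j
        = if i ∈ l ∧ j < (od.getD 0 []).length ∧ q i j = true then "," else pvCell d i j := by
  intro l
  induction l with
  | nil => intro _ d hsh; exact ⟨hsh, by simp⟩
  | cons x xs ih =>
    intro hrange d hsh
    have hx : x < od.length := hrange x (by simp)
    set d' := (List.range (od.getD 0 []).length).foldl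
        (fun data c => if q x c then pvSetCell data x c "," else data) d with hd'
    have hsh' : pvShape od d' := pvCondRowFold_shape od x (q x) _ d hsh
    have hcell' : ∀ i j, pvCell d' i j
        = if i = x ∧ j < (od.getD 0 []).length ∧ q x j = true then "," else pvCell d i j := by
      intro i j
      rw [hd', pvCondRowFold_cell]
      by_cases hi : i = x
      · subst hi
        by_cases hj : j < (od.getD 0 []).length
        · by_cases hq : q i j = true
          · have h1 : i < d.length := by rw [hsh.1]; exact hx
            have h2 : j < (d.getD i []).length := by
              rw [hsh.2 i]; exact lt_of_lt_of_le hj (hb i hx)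
            rw [if_pos ⟨rfl, List.mem_range.mpr hj, hq, h1, h2⟩, if_pos ⟨rfl, hj, hq⟩]
          · rw [if_neg (fun h => hq h.2.2.1), if_neg (fun h => hq h.2.2)]
        · rw [if_neg (fun h => hj (List.mem_range.mp h.2.1)), if_neg (fun h => hj h.2.1)]
      · rw [if_neg (fun h => hi h.1), if_neg (fun h => hi h.1)]
    obtain ⟨hshf, hcellf⟩ := ih (fun r hr => hrange r (by simp [hr])) d' hsh'
    refine ⟨?_, ?_⟩
    · rw [List.foldl_cons, ← hd']; exact hshf
    · intro i j
      rw [List.foldl_cons, ← hd', hcellf i j, hcell' i j]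
      simp only [List.mem_cons]
      by_cases hix : i = x
      · subst hix
        split_ifs <;> first | rfl | tauto
      · split_ifs <;> first | rfl | tauto

-- two grids with the same shape and the same cells are equal
lemma pvGrid_ext (d1 d2 : List (List String)) (h1 : d1.length = d2.length)
    (h2 : ∀ i, (d1.getD i []).length = (d2.getD i []).length)
    (h3 : ∀ i j, pvCell d1 i j = pvCell d2 i j) : d1 = d2 := by
  apply List.ext_getElem h1
  intro i hi1 hi2
  have hrl := h2 i
  rw [List.getD_eq_getElem _ _ hi1, List.getD_eq_getElem _ _ hi2] at hrl
  apply List.ext_getElem hrl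
  intro j hj1 hj2
  have hc := h3 i j
  unfold pvCell at hc
  rwa [List.getD_eq_getElem _ _ hi1, List.getD_eq_getElem _ _ hi2,
    List.getD_eq_getElem _ _ hj1, List.getD_eq_getElem _ _ hj2] at hc

-- ===== VERDICT (by name: the statement is the Claim_ definition above) =====
theorem mark_empty_rows_and_columns_spec : Claim_equal_mark_empty_rows_and_columns := by
  intro od _ hPre
  obtain ⟨hne, hlen, hPre3⟩ := hPre
  have hb : ∀ i < od.length, (od.getD 0 []).length ≤ (od.getD i []).length := by
    intro i hi
    rw [List.getD_eq_getElem _ _ hi]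
    exact hlen _ (List.getElem_mem hi)
  obtain ⟨hsh1, hcell1⟩ := pvColPass od hb ((List.range (od.getD 0 []).length).reverse)
      (by rw [List.nodup_reverse]; exact List.nodup_range) (fun c hc => List.mem_range.mp (List.mem_reverse.mp hc))
      od ⟨rfl, fun i => rfl⟩ (fun r j _ => rfl)
  set d1 := ((List.range (od.getD 0 []).length).reverse).foldl
      (fun data c => pvColStep od.length data c) od with hd1
  obtain ⟨hshA, hcellA⟩ := pvRowPass od d1 hb ((List.range od.length).reverse)
      (by rw [List.nodup_reverse]; exact List.nodup_range) (fun r hr => List.mem_range.mp (List.mem_reverse.mp hr))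
      d1 hsh1 (fun r c _ => rfl)
  set q : Nat → Nat → Bool := fun r c =>
      (PySem.Set.ofList ((List.range od.length).filter
        (fun r => pvRowAllDots od (od.getD 0 []).length r))).contains r
      || (PySem.Set.ofList ((List.range (od.getD 0 []).length).filter
        (fun c => pvColAllDots od od.length c))).contains c with hq_def
  obtain ⟨hshB, hcellB⟩ := pvBPass od hb q (List.range od.length)
      (fun r hr => List.mem_range.mp hr) od ⟨rfl, fun i => rfl⟩
  have hA : mark_empty_rows_and_columns od
      = ((List.range od.length).reverse).foldl
          (fun data r => pvRowStep ((d1.getD 0 []).length) data r) d1 := rfl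
  rw [hsh1.2 0] at hA
  have hB : mark_empty_rows_and_columns_alt od
      = (List.range od.length).foldl (fun data r =>
          (List.range (od.getD 0 []).length).foldl
            (fun data c => if q r c then pvSetCell data r c "," else data) data) od := rfl
  unfold Spec_mark_empty_rows_and_columns
  rw [hA, hB]
  have hcontR : ∀ i, (PySem.Set.ofList ((List.range od.length).filter
        (fun r => pvRowAllDots od (od.getD 0 []).length r))).contains i = true
      ↔ (i < od.length ∧ ∀ c < (od.getD 0 []).length, pvCell od i c = ".") := by
    intro i
    rw [PySem.Set.contains_iff, PySem.Set.mem_ofList, List.mem_filter]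
    simp [pvRowAllDots, List.all_eq_true, List.mem_range]
  have hcontC : ∀ j, (PySem.Set.ofList ((List.range (od.getD 0 []).length).filter
        (fun c => pvColAllDots od od.length c))).contains j = true
      ↔ (j < (od.getD 0 []).length ∧ ∀ r < od.length, pvCell od r j = ".") := by
    intro j
    rw [PySem.Set.contains_iff, PySem.Set.mem_ofList, List.mem_filter]
    simp [pvColAllDots, List.all_eq_true, List.mem_range]
  have hRowA : ∀ i, i < od.length →
      ((∀ c < (od.getD 0 []).length, (pvCell d1 i c = "." ∨ pvCell d1 i c = ","))
        ↔ (∀ c < (od.getD 0 []).length, pvCell od i c = ".")) := by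
    intro i hi
    have hodieq : od.getD i [] = od[i] := List.getD_eq_getElem _ _ hi
    have hcellod : ∀ c : Nat, pvCell od i c = od[i].getD c "" := by
      intro c; unfold pvCell; rw [hodieq]
    by_cases hex : ∀ c < (od.getD 0 []).length, (pvCell od i c = "." ∨ pvCell od i c = ",")
    · have hnocomma : ∀ c < (od.getD 0 []).length, pvCell od i c ≠ "," := by
        intro c hc
        rw [hcellod c]
        exact hPre3 od[i] (List.getElem_mem hi)
          (fun c' hc' => by rw [← hcellod c']; exact hex c' hc') c hc
      have hdots : ∀ c < (od.getD 0 []).length, pvCell od i c = "." :=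
        fun c hc => (hex c hc).resolve_right (hnocomma c hc)
      constructor
      · intro _; exact hdots
      · intro _ c hc
        rw [hcell1 i c]
        by_cases hcol : pvColE od c
        · rw [if_pos ⟨hi, List.mem_reverse.mpr (List.mem_range.mpr hc), hcol⟩]
          exact Or.inr rfl
        · rw [if_neg (fun hx => hcol hx.2.2)]
          exact Or.inl (hdots c hc)
    · push_neg at hex
      obtain ⟨c0, hc0, hbad1, hbad2⟩ : ∃ c0 < (od.getD 0 []).length,
          pvCell od i c0 ≠ "." ∧ pvCell od i c0 ≠ "," := by
        obtain ⟨c0, hc0, hb0⟩ := hex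
        exact ⟨c0, hc0, hb0.1, hb0.2⟩
      have hcol : ¬ pvColE od c0 := fun hcol => hbad1 (hcol i hi)
      constructor
      · intro h
        exfalso
        have hh := h c0 hc0
        rw [hcell1 i c0, if_neg (fun hx => hcol hx.2.2)] at hh
        rcases hh with h1 | h2
        · exact hbad1 h1
        · exact hbad2 h2
      · intro h
        exact absurd (h c0 hc0) hbad1
  apply pvGrid_ext
  · rw [hshA.1, hshB.1]
  · intro i; rw [hshA.2 i, hshB.2 i]
  · intro i j
    rw [hcellA i j, hcellB i j, hcell1 i j]
    simp only [List.mem_reverse, List.mem_range]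
    by_cases hi : i < od.length
    · by_cases hj : j < (od.getD 0 []).length
      · by_cases hrow : ∀ c < (od.getD 0 []).length, pvCell od i c = "."
        · have hA' : ∀ c < (od.getD 0 []).length, (pvCell d1 i c = "." ∨ pvCell d1 i c = ",") :=
            (hRowA i hi).mpr hrow
          have hqi : q i j = true := by
            have hc := (hcontR i).mpr ⟨hi, hrow⟩
            simp only [hq_def, Bool.or_eq_true]
            exact Or.inl hc
          rw [if_pos ⟨hi, hj, hA'⟩, if_pos ⟨hi, hj, hqi⟩]
        · have hA' : ¬ (∀ c < (od.getD 0 []).length, (pvCell d1 i c = "." ∨ pvCell d1 i c = ",")) :=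
            fun h => hrow ((hRowA i hi).mp h)
          rw [if_neg (fun h => hA' h.2.2)]
          by_cases hcol : pvColE od j
          · have hqj : q i j = true := by
              have hc := (hcontC j).mpr ⟨hj, hcol⟩
              simp only [hq_def, Bool.or_eq_true]
              exact Or.inr hc
            rw [if_pos ⟨hi, hj, hcol⟩, if_pos ⟨hi, hj, hqj⟩]
          · have hqf : ¬ q i j = true := by
              rw [hq_def]
              simp only [Bool.or_eq_true]
              rintro (hr | hc)
              · exact hrow ((hcontR i).mp hr).2
              · exact hcol (fun r hrlt => ((hcontC j).mp hc).2 r hrlt)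
            rw [if_neg (fun h => hcol h.2.2), if_neg (fun h => hqf h.2.2)]
      · rw [if_neg (fun h => hj h.2.1), if_neg (fun h => hj h.2.1), if_neg (fun h => hj h.2.1)]
    · rw [if_neg (fun h => hi h.1), if_neg (fun h => hi h.1), if_neg (fun h => hi h.1)]
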